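-- pv_equiv track=rewrite | github.com/moatles/stable-diffusion-webui-reForge | modules/processing.py | _build_dynamic_clip_skip_schedule
-- ===== SOURCE A (Python) =====
-- from typing import Any, Callable, Dict, List, Optional, Tuple, Union
--
-- MIN_CLIP_SKIP = 2
--
-- def _build_dynamic_clip_skip_schedule(
--
--     total_steps: int,
--     start: int
-- ) -> List[int]:
--     """Build linear clip skip schedule."""
--     schedule = []
--     current = int(start)
--     for _ in range(total_steps):
--         schedule.append(current)
--         if current > MIN_CLIP_SKIP:
--             current -= 1
--         if current < MIN_CLIP_SKIP:
--             current = MIN_CLIP_SKIP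
--     return schedule
-- ===== SOURCE B (Python) =====
-- MIN_CLIP_SKIP = 2
--
-- def _build_dynamic_clip_skip_schedule(total_steps, start):
--     """Closed-form schedule: raw start first, then a ramp clamped at MIN_CLIP_SKIP."""
--     s = int(start)
--     return [s if i == 0 else max(MIN_CLIP_SKIP, s - i) for i in range(total_steps)]
-- ===== Notes on version B (the rewrite author's own statement) =====
-- stated objective: simpler
-- what changed: Replaces the loop threading a mutable branch-clamped accumulator with a direct closed form per index: element i is the raw start for i=0 and max(MIN_CLIP_SKIP, start-i) afterwards.
import Mathlib
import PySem

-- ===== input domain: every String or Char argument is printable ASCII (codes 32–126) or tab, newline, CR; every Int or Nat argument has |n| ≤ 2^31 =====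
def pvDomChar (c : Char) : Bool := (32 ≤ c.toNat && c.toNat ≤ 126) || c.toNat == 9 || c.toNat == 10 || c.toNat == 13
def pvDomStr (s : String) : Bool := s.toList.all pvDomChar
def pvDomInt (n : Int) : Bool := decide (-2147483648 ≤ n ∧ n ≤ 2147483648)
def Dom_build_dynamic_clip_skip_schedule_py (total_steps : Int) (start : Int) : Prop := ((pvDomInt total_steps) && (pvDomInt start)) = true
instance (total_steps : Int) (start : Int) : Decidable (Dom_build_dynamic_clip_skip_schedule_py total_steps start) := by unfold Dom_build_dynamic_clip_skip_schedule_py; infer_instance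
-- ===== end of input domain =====

-- B replaces A's mutable, branch-clamped running `current` with a per-index closed form (objective: simpler).


-- ===== PORT A =====
-- loop body of A: append current, decrement if > MIN_CLIP_SKIP, clamp below at MIN_CLIP_SKIP
def pvStepA (st : List Int × Int) : List Int × Int :=
  let schedule := st.1 ++ [st.2]
  let current := if st.2 > 2 then st.2 - 1 else st.2
  let current := if current < 2 then 2 else current
  (schedule, current)

def build_dynamic_clip_skip_schedule_py (total_steps : Int) (start : Int) : List Int :=
  ((PySem.List.pyRange 0 total_steps 1).foldl (fun st _ => pvStepA st) ([], start)).1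

-- ===== PORT B =====
def build_dynamic_clip_skip_schedule_py_alt (total_steps : Int) (start : Int) : List Int :=
  (PySem.List.pyRange 0 total_steps 1).map (fun i => if i = 0 then start else max 2 (start - i))

-- ===== PRECONDITION & SPEC =====
def Spec_build_dynamic_clip_skip_schedule_py (total_steps : Int) (start : Int) (out : List Int) : Prop := out = build_dynamic_clip_skip_schedule_py_alt total_steps start
instance (total_steps : Int) (start : Int) (out : List Int) : Decidable (Spec_build_dynamic_clip_skip_schedule_py total_steps start out) := by unfold Spec_build_dynamic_clip_skip_schedule_py; infer_instance

-- ===== CLAIM (what is proved, stated in full; the proofs are below) =====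
def Claim_equal_build_dynamic_clip_skip_schedule_py : Prop := ∀ (total_steps : Int) (start : Int), Dom_build_dynamic_clip_skip_schedule_py total_steps start → Spec_build_dynamic_clip_skip_schedule_py total_steps start (build_dynamic_clip_skip_schedule_py total_steps start)

-- ===== LEMMAS AND PROOFS =====

-- ===== VERDICT (by name: the statement is the Claim_ definition above) =====
lemma pv_loop (n : Nat) (start : Int) :
    (PySem.List.pyRange 0 (n : Int) 1).foldl (fun st _ => pvStepA st) ([], start) =
      ((PySem.List.pyRange 0 (n : Int) 1).map (fun i => if i = 0 then start else max 2 (start - i)),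
       if n = 0 then start else max 2 (start - n)) := by
  induction n with
  | zero => simp [PySem.List.pyRange_one_eq_nil]
  | succ k ih =>
      have h : ((k : Int) + 1) = ((k + 1 : Nat) : Int) := by push_cast; ring
      rw [← h, PySem.List.pyRange_one_succ_right (by positivity), List.foldl_append, ih,
        List.map_append]
      simp only [List.foldl_cons, List.foldl_nil, List.map_cons, List.map_nil, pvStepA, Prod.mk.injEq]
      constructor
      · rcases Nat.eq_zero_or_pos k with hk | hk
        · simp [hk]
        · have hk1 : k ≠ 0 := by omega
          have hk2 : (k : Int) ≠ 0 := by omega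
          simp [hk1, hk2]
      · rcases Nat.eq_zero_or_pos k with hk | hk
        · subst hk
          simp only [Nat.cast_zero, if_pos rfl, Nat.zero_add, Nat.cast_one,
            if_neg (by omega : ¬(0 + 1 = 0))]
          split_ifs <;> omega
        · have hk1 : k ≠ 0 := by omega
          simp only [if_neg hk1, if_neg (by omega : ¬(k + 1 = 0))]
          push_cast
          split_ifs <;> omega

theorem build_dynamic_clip_skip_schedule_py_spec : Claim_equal_build_dynamic_clip_skip_schedule_py := by
  intro total_steps start _
  unfold Spec_build_dynamic_clip_skip_schedule_py build_dynamic_clip_skip_schedule_py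
    build_dynamic_clip_skip_schedule_py_alt
  rcases (by omega : total_steps ≤ 0 ∨ 0 < total_steps) with h | h
  · simp [PySem.List.pyRange_one_eq_nil h]
  · have : total_steps = ((total_steps.toNat : Nat) : Int) := by omega
    rw [this, pv_loop]
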